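-- pv_equiv track=rewrite | github.com/RedFyru/MIAPO2 | main.py | find_shortest_longest_gaps
-- ===== SOURCE A (Python) =====
-- def lucky_tickets(ticket_number):
--     digits = [int(digit) for digit in str(ticket_number).rjust(6, '0')]
--     return sum(digits[:3]) == sum(digits[3:])
--
-- def find_shortest_longest_gaps(start_long_short, end):
--     gaps = []
--     current_gap_start = None
--     for i in range(start_long_short, end + 1):
--         if lucky_tickets(i):
--             if current_gap_start is not None:
--                 gaps.append((current_gap_start, i))
--                 current_gap_start = None
--         elif current_gap_start is None:
--             current_gap_start = i
--     shortest_gap = min(gaps, key=lambda gap: gap[1] - gap[0]) if gaps else None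
--     longest_gap = max(gaps, key=lambda gap: gap[1] - gap[0]) if gaps else None
--     return shortest_gap, longest_gap
-- ===== SOURCE B (Python) =====
-- def _digit_sum(n):
--     s = 0
--     while n > 0:
--         s += n % 10
--         n //= 10
--     return s
--
--
-- def _is_lucky(i):
--     d = 1000
--     while 1000 * d <= i:
--         d *= 10
--     return _digit_sum(i // d) == _digit_sum(i % d)
--
--
-- def find_shortest_longest_gaps(start_long_short, end):
--     luckies = [i for i in range(start_long_short, end + 1) if _is_lucky(i)]
--     gaps = []
--     if luckies and luckies[0] != start_long_short:
--         gaps.append((start_long_short, luckies[0]))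
--     for p, q in zip(luckies, luckies[1:]):
--         if q - p > 1:
--             gaps.append((p + 1, q))
--     if not gaps:
--         return None, None
--     shortest = min(gaps, key=lambda g: g[1] - g[0])
--     longest = max(gaps, key=lambda g: g[1] - g[0])
--     return shortest, longest
-- ===== Notes on version B (the rewrite author's own statement) =====
-- stated objective: faster
-- what changed: B tests luckiness with pure integer arithmetic (digit sums via divmod loops, no string conversion) and builds the gap list from the collected list of lucky positions (head gap plus consecutive-pair pass) instead of threading a current-gap-start state through the scan; intended as constant-factor faster (a timing run measured 1.88x at the largest size, though one run with near-empty ranges was inconclusive).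
import Mathlib
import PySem

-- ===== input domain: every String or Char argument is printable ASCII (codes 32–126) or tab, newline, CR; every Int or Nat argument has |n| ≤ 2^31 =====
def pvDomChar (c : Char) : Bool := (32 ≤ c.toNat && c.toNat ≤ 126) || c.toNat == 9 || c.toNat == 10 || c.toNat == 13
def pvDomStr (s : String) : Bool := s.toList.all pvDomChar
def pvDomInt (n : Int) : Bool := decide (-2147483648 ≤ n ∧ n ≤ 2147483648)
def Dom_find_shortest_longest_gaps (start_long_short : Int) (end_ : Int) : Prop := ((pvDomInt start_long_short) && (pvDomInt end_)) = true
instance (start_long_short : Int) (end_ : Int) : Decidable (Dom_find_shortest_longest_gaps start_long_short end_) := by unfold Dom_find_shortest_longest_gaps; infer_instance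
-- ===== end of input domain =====

-- B replaces the per-ticket string/char digit work of A by pure integer arithmetic (digit sums via
-- divmod loops) and builds the gap list from the list of lucky positions (head gap + consecutive
-- pairs) instead of carrying a current-gap-start state through the scan.

-- ===== PORT A =====
-- int(c) for a single character c; the `.getD 0` default is unreachable on Pre_ inputs,
-- where every character of the padded string is one of '0'..'9'.
def pvIntOfDigitChar (c : Char) : Int := (PySem.Int.ofChars? [c]).getD 0

def lucky_tickets (ticket_number : Int) : Bool :=
  let s := (PySem.Int.toStr ticket_number).toList
  -- s.rjust(6, '0'): hand-ported (no PySem primitive); exact: pads on the left with '0'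
  -- iff the string is shorter than 6 (replicate of 0 characters otherwise).
  let padded := List.replicate (6 - s.length) '0' ++ s
  let digits := padded.map pvIntOfDigitChar
  decide ((PySem.List.slice digits none (some 3)).sum = (PySem.List.slice digits (some 3) none).sum)

def pvStepA (acc : List (Int × Int) × Option Int) (i : Int) : List (Int × Int) × Option Int :=
  if lucky_tickets i then
    match acc.2 with
    | some c => (acc.1 ++ [(c, i)], none)
    | none => acc
  else
    match acc.2 with
    | some _ => acc
    | none => (acc.1, some i)

def find_shortest_longest_gaps (start_long_short : Int) (end_ : Int) : (Option (Int × Int)) × (Option (Int × Int)) :=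
  let st := (PySem.List.pyRange start_long_short (end_ + 1) 1).foldl pvStepA ([], none)
  let gaps := st.1
  let shortest := if gaps.isEmpty then none else PySem.List.min? gaps (fun gap => gap.2 - gap.1)
  let longest := if gaps.isEmpty then none else PySem.List.max? gaps (fun gap => gap.2 - gap.1)
  (shortest, longest)

-- ===== PORT B =====
def pvDigitSum (n : Int) : Int :=
  if _h : 0 < n then PySem.Int.mod n 10 + pvDigitSum (PySem.Int.floordiv n 10) else 0
termination_by n.toNat
decreasing_by
  rw [PySem.Int.floordiv_eq_ediv_of_pos (by omega : (0:Int) < 10)]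
  omega

-- the `while 1000 * d <= i: d *= 10` loop of _is_lucky (d carries its positivity for termination)
def pvFindD (i : Int) (d : Int) (hd : 0 < d) : Int :=
  if 1000 * d ≤ i then pvFindD i (d * 10) (by omega) else d
termination_by (i + 1 - d).toNat
decreasing_by omega

def pvLuckyAlt (i : Int) : Bool :=
  let d := pvFindD i 1000 (by omega)
  pvDigitSum (PySem.Int.floordiv i d) == pvDigitSum (PySem.Int.mod i d)

def pvStepB (acc : List (Int × Int)) (pq : Int × Int) : List (Int × Int) :=
  if pq.2 - pq.1 > 1 then acc ++ [(pq.1 + 1, pq.2)] else acc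

def find_shortest_longest_gaps_alt (start_long_short : Int) (end_ : Int) : (Option (Int × Int)) × (Option (Int × Int)) :=
  let luckies := (PySem.List.pyRange start_long_short (end_ + 1) 1).filter pvLuckyAlt
  let headGap : List (Int × Int) :=
    match luckies with
    | [] => []
    | q :: _ => if q ≠ start_long_short then [(start_long_short, q)] else []
  let gaps := (luckies.zip luckies.tail).foldl pvStepB headGap
  if gaps.isEmpty then (none, none)
  else (PySem.List.min? gaps (fun gap => gap.2 - gap.1), PySem.List.max? gaps (fun gap => gap.2 - gap.1))

-- ===== PRECONDITION & SPEC =====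
-- Pre_ excludes exactly the inputs where A raises: if the range contains a negative ticket number,
-- str(i) starts with '-' and int('-') raises ValueError (an empty range iterates over nothing, so
-- any start > end is fine).
def Pre_find_shortest_longest_gaps (start_long_short : Int) (end_ : Int) : Prop :=
  0 ≤ start_long_short ∨ end_ < start_long_short
instance (start_long_short : Int) (end_ : Int) : Decidable (Pre_find_shortest_longest_gaps start_long_short end_) := by unfold Pre_find_shortest_longest_gaps; infer_instance
def pvWitness_find_shortest_longest_gaps : Int × Int := (0, 25)

def Spec_find_shortest_longest_gaps (start_long_short : Int) (end_ : Int) (out : (Option (Int × Int)) × (Option (Int × Int))) : Prop := out = find_shortest_longest_gaps_alt start_long_short end_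
instance (start_long_short : Int) (end_ : Int) (out : (Option (Int × Int)) × (Option (Int × Int))) : Decidable (Spec_find_shortest_longest_gaps start_long_short end_ out) := by unfold Spec_find_shortest_longest_gaps; infer_instance

-- ===== CLAIM (what is proved, stated in full; the proofs are below) =====
def Claim_equal_find_shortest_longest_gaps : Prop := ∀ (start_long_short : Int) (end_ : Int), Dom_find_shortest_longest_gaps start_long_short end_ → Pre_find_shortest_longest_gaps start_long_short end_ → Spec_find_shortest_longest_gaps start_long_short end_ (find_shortest_longest_gaps start_long_short end_)

-- ===== LEMMAS AND PROOFS =====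

/- ## Digit characters: `str(m)` for a natural number, as a structural recursion -/

-- str(m) for m ≥ 0, most significant digit first (shown equal to Nat.toDigits 10 below)
def pvRepr (m : Nat) : List Char :=
  if m < 10 then [Nat.digitChar m] else pvRepr (m / 10) ++ [Nat.digitChar (m % 10)]
decreasing_by omega

-- the last k characters of str(m): the k low-order digits of m
def pvLow : Nat → Nat → List Char
  | 0, _ => []
  | k + 1, m => pvLow k (m / 10) ++ [Nat.digitChar (m % 10)]

-- mathematical digit sum
def pvDS (m : Nat) : Nat :=
  if m = 0 then 0 else m % 10 + pvDS (m / 10)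
decreasing_by omega

def pvCharSum (l : List Char) : Int := (l.map pvIntOfDigitChar).sum

lemma pvToDigitsCore_eq : ∀ (fuel n : Nat) (ds : List Char), n < fuel →
    Nat.toDigitsCore 10 fuel n ds = pvRepr n ++ ds := by
  intro fuel
  induction fuel with
  | zero => omega
  | succ f ih =>
      intro n ds h
      rw [Nat.toDigitsCore]
      by_cases h10 : n < 10
      · have h0 : n / 10 = 0 := by omega
        have hm : n % 10 = n := by omega
        simp [h0, hm, pvRepr, h10]
      · have hne : ¬ n / 10 = 0 := by omega
        simp only [hne, if_false]
        rw [ih (n / 10) _ (by omega)]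
        conv_rhs => rw [pvRepr]
        simp [h10]

lemma pvToDigits_eq (n : Nat) : Nat.toDigits 10 n = pvRepr n := by
  rw [Nat.toDigits, pvToDigitsCore_eq (n + 1) n [] (by omega), List.append_nil]

lemma pvVal_digitChar {d : Nat} (h : d < 10) : pvIntOfDigitChar (Nat.digitChar d) = (d : Int) := by
  interval_cases d <;> decide

lemma pvDS_zero : pvDS 0 = 0 := by
  rw [pvDS]; norm_num

lemma pvDS_step (m : Nat) : pvDS m = m % 10 + pvDS (m / 10) := by
  conv_lhs => rw [pvDS]
  by_cases h : m = 0
  · subst h; simp [pvDS]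
  · simp [h]

lemma pvCharSum_append (l₁ l₂ : List Char) : pvCharSum (l₁ ++ l₂) = pvCharSum l₁ + pvCharSum l₂ := by
  simp [pvCharSum]

lemma pvCharSum_zeros (k : Nat) : pvCharSum (List.replicate k '0') = 0 := by
  induction k with
  | zero => rfl
  | succ k ih =>
      rw [List.replicate_succ]
      have h0 : pvIntOfDigitChar '0' = 0 := by decide
      simp only [pvCharSum, List.map_cons, List.sum_cons, h0]
      simpa [pvCharSum] using ih

lemma pvCharSum_pvRepr (m : Nat) : pvCharSum (pvRepr m) = (pvDS m : Int) := by
  induction m using pvRepr.induct with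
  | case1 m h =>
      rw [pvRepr]
      simp only [h, if_true]
      have : pvDS m = m := by
        rw [pvDS_step, show m / 10 = 0 by omega, pvDS_zero]; omega
      simp [pvCharSum, pvVal_digitChar h, this]
  | case2 m h ih =>
      rw [pvRepr]
      simp only [h, if_false]
      rw [pvCharSum_append, ih]
      have : pvCharSum [Nat.digitChar (m % 10)] = ((m % 10 : Nat) : Int) := by
        simpa [pvCharSum] using pvVal_digitChar (Nat.mod_lt m (by omega))
      rw [this]
      rw [pvDS_step m]
      push_cast
      ring

lemma pvLow_length (k m : Nat) : (pvLow k m).length = k := by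
  induction k generalizing m with
  | zero => rfl
  | succ k ih => simp [pvLow, ih]

lemma pvCharSum_pvLow (k m : Nat) : pvCharSum (pvLow k m) = (pvDS (m % 10 ^ k) : Int) := by
  induction k generalizing m with
  | zero => simp [pvLow, pvCharSum, Nat.mod_one, pvDS_zero]
  | succ k ih =>
      rw [pvLow, pvCharSum_append, ih]
      have hval : pvCharSum [Nat.digitChar (m % 10)] = ((m % 10 : Nat) : Int) := by
        simpa [pvCharSum] using pvVal_digitChar (Nat.mod_lt m (by omega))
      rw [hval]
      have h1 : m % 10 ^ (k + 1) % 10 = m % 10 :=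
        Nat.mod_mod_of_dvd m ⟨10 ^ k, by ring⟩
      have h2 : m % 10 ^ (k + 1) / 10 = m / 10 % 10 ^ k := by
        have := Nat.mod_mul_right_div_self m 10 (10 ^ k)
        rw [pow_succ, mul_comm]
        exact this
      rw [pvDS_step (m % 10 ^ (k + 1)), h1, h2]
      push_cast
      ring

lemma pvRepr_split (k : Nat) : ∀ m : Nat, 10 ^ k ≤ m →
    pvRepr m = pvRepr (m / 10 ^ k) ++ pvLow k m := by
  induction k with
  | zero => intro m _; simp [pvLow]
  | succ k ih =>
      intro m hm
      have h10 : ¬ m < 10 := by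
        have : (10:Nat) ≤ 10 ^ (k + 1) := by
          calc (10:Nat) = 10 ^ 1 := by ring
          _ ≤ 10 ^ (k + 1) := Nat.pow_le_pow_right (by omega) (by omega)
        omega
      conv_lhs => rw [pvRepr]
      simp only [h10, if_false]
      have hdiv : 10 ^ k ≤ m / 10 := by
        rw [Nat.le_div_iff_mul_le (by omega)]
        calc 10 ^ k * 10 = 10 ^ (k + 1) := by ring
        _ ≤ m := hm
      rw [ih (m / 10) hdiv]
      rw [pvLow]
      have : m / 10 / 10 ^ k = m / 10 ^ (k + 1) := by
        rw [Nat.div_div_eq_div_mul, pow_succ, mul_comm]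
      rw [this, List.append_assoc]

lemma pvRepr_length (m : Nat) : (pvRepr m).length = Nat.log 10 m + 1 := by
  induction m using pvRepr.induct with
  | case1 m h =>
      rw [pvRepr]
      simp only [h, if_true]
      have : Nat.log 10 m = 0 := Nat.log_eq_zero_iff.mpr (Or.inl h)
      simp [this]
  | case2 m h ih =>
      rw [pvRepr]
      simp only [h, if_false]
      rw [List.length_append, ih, Nat.log_div_base]
      have : 0 < Nat.log 10 m := Nat.log_pos (by omega) (by omega)
      simp
      omega

lemma pvLog_div_pow (m k : Nat) : Nat.log 10 (m / 10 ^ k) = Nat.log 10 m - k := by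
  induction k generalizing m with
  | zero => simp
  | succ k ih =>
      rw [pow_succ, ← Nat.div_div_eq_div_mul, Nat.log_div_base, ih]
      omega

/- ## The two lucky tests agree on nonnegative tickets -/

-- the split point: the number of low digits, (max 6 len) - 3
def pvK (m : Nat) : Nat := max 6 (Nat.log 10 m + 1) - 3

lemma pvRepr_toChars (m : Nat) : (PySem.Int.toStr (m : Int)).toList = pvRepr m := by
  rw [PySem.Int.toList_toStr]
  simp [PySem.Int.toChars, show ¬((m:Int) < 0) by omega, pvToDigits_eq]

lemma pvLog_ge (m k : Nat) (h : 10 ^ k ≤ m) : k ≤ Nat.log 10 m := by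
  have h0 : 0 < 10 ^ k := by positivity
  exact (Nat.le_log_iff_pow_le (by omega) (by omega)).mpr h

lemma pvLuckyA_char (m : Nat) :
    lucky_tickets (m : Int) = decide (pvDS (m / 10 ^ pvK m) = pvDS (m % 10 ^ pvK m)) := by
  unfold lucky_tickets
  simp only [pvRepr_toChars]
  rw [PySem.List.slice_to _ (by omega : (0:Int) ≤ 3), PySem.List.slice_from _ (by omega : (0:Int) ≤ 3)]
  have h3 : ((3:Int)).toNat = 3 := by decide
  rw [h3]
  rw [decide_eq_decide]
  have hlen := pvRepr_length m
  have hmap : ∀ l : List Char, (List.map pvIntOfDigitChar l).sum = pvCharSum l := fun _ => rfl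
  have v0 : pvIntOfDigitChar '0' = 0 := by decide
  by_cases hm : m < 1000
  · -- short numbers: the first three characters of the padded string are all '0'
    have hlog : Nat.log 10 m < 3 := by
      rcases Nat.eq_zero_or_pos m with h0 | h0
      · simp [h0]
      · exact (Nat.log_lt_iff_lt_pow (by omega) (by omega)).mpr hm
    have hK : pvK m = 3 := by unfold pvK; omega
    have hdiv0 : m / 10 ^ pvK m = 0 := by rw [hK]; norm_num; omega
    have hmod : m % 10 ^ pvK m = m := by rw [hK]; norm_num; omega
    rw [List.map_append, List.map_replicate, v0]
    rw [List.take_append_of_le_length (by simp; omega)]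
    rw [List.drop_append_of_le_length (by simp; omega)]
    rw [List.take_replicate, List.drop_replicate]
    rw [List.sum_append, hmap, pvCharSum_pvRepr]
    rw [hdiv0, hmod, pvDS_zero]
    simp [List.sum_replicate]
    omega
  · -- long numbers: split str(m) into its top part and its pvK m low digits
    have hm0 : m ≠ 0 := by omega
    have hlog3 : 3 ≤ Nat.log 10 m := pvLog_ge m 3 (by norm_num; omega)
    have hk_le : pvK m ≤ Nat.log 10 m := by unfold pvK; omega
    have hkm : 10 ^ pvK m ≤ m :=
      le_trans (Nat.pow_le_pow_right (by omega) hk_le) (Nat.pow_log_le_self 10 hm0)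
    have hlen2 : (pvRepr (m / 10 ^ pvK m)).length = Nat.log 10 m - pvK m + 1 := by
      rw [pvRepr_length, pvLog_div_pow]
    rw [pvRepr_split (pvK m) m hkm]
    rw [← List.append_assoc, List.map_append]
    have hplen : (List.map pvIntOfDigitChar
        (List.replicate (6 - (pvRepr (m / 10 ^ pvK m) ++ pvLow (pvK m) m).length) '0'
          ++ pvRepr (m / 10 ^ pvK m))).length = 3 := by
      simp only [List.length_map, List.length_append, List.length_replicate, pvLow_length, hlen2]
      unfold pvK at *
      omega
    rw [List.take_left' hplen, List.drop_left' hplen]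
    rw [hmap, hmap, pvCharSum_append, pvCharSum_zeros, pvCharSum_pvRepr, pvCharSum_pvLow]
    omega

lemma pvDigitSum_eq : ∀ (n : Int), 0 ≤ n → pvDigitSum n = (pvDS n.toNat : Int) := by
  intro n
  induction n using pvDigitSum.induct with
  | case1 n hpos ih =>
      intro _
      rw [pvDigitSum]
      simp only [hpos, dif_pos]
      rw [PySem.Int.floordiv_eq_ediv_of_pos (by omega : (0:Int) < 10)] at *
      rw [PySem.Int.mod_eq_emod_of_pos (by omega : (0:Int) < 10)]
      rw [ih (by omega)]
      have hdiv : (n / 10).toNat = n.toNat / 10 := by omega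
      rw [hdiv, pvDS_step n.toNat]
      push_cast
      omega
  | case2 n hpos =>
      intro h
      rw [pvDigitSum]
      simp only [hpos, dif_neg, not_false_iff]
      have : n.toNat = 0 := by omega
      rw [this, pvDS_zero]
      simp

lemma pvFindD_congr (i d d' : Int) (hd : 0 < d) (hd' : 0 < d') (h : d = d') :
    pvFindD i d hd = pvFindD i d' hd' := by subst h; rfl

lemma pvFindD_go : ∀ (j e : Nat) (m : Nat) (hd : 0 < (10:Int) ^ e), 3 ≤ e →
    Nat.log 10 m + 1 ≤ e + 3 + j →
    pvFindD (m : Int) ((10:Int) ^ e) hd = (10:Int) ^ (max e (Nat.log 10 m + 1 - 3)) := by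
  intro j
  induction j with
  | zero =>
      intro e m hd he hb
      rw [pvFindD]
      have hc : ¬ (1000 * (10:Int) ^ e ≤ (m : Int)) := by
        intro hc
        have hcn : 10 ^ (e + 3) ≤ m := by
          have : ((10 ^ (e + 3) : Nat) : Int) ≤ (m : Int) := by push_cast; ring_nf; ring_nf at hc; omega
          exact_mod_cast this
        have := pvLog_ge m (e + 3) hcn
        omega
      simp only [hc, if_false]
      congr 1
      omega
  | succ j ih =>
      intro e m hd he hb
      rw [pvFindD]
      by_cases hc : 1000 * (10:Int) ^ e ≤ (m : Int)
      · simp only [hc, if_true]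
        have hcn : 10 ^ (e + 3) ≤ m := by
          have : ((10 ^ (e + 3) : Nat) : Int) ≤ (m : Int) := by push_cast; ring_nf; ring_nf at hc; omega
          exact_mod_cast this
        have hlg := pvLog_ge m (e + 3) hcn
        have hpow : (10:Int) ^ e * 10 = (10:Int) ^ (e + 1) := by ring
        rw [pvFindD_congr (m : Int) ((10:Int) ^ e * 10) ((10:Int) ^ (e + 1)) (by positivity) (by positivity) hpow]
        rw [ih (e + 1) m (by positivity) (by omega) (by omega)]
        congr 1
        omega
      · simp only [hc, if_false]
        have hlt : Nat.log 10 m < e + 3 := by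
          by_contra hge
          push Not at hge
          have : (10:Nat) ^ (e + 3) ≤ m :=
            le_trans (Nat.pow_le_pow_right (by omega) hge) (Nat.pow_log_le_self 10 (by
              intro h0; rw [h0] at hge; simp at hge))
          apply hc
          have : ((10 ^ (e + 3) : Nat) : Int) ≤ (m : Int) := by exact_mod_cast this
          push_cast at this; ring_nf; ring_nf at this; omega
        congr 1
        omega

lemma pvFindD_eq (m : Nat) (hd : 0 < (1000:Int)) :
    pvFindD (m : Int) 1000 hd = ((10 ^ (pvK m) : Nat) : Int) := by
  have h1000 : (1000:Int) = (10:Int) ^ 3 := by norm_num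
  rw [pvFindD_congr (m : Int) 1000 ((10:Int) ^ 3) hd (by norm_num) h1000]
  rw [pvFindD_go (Nat.log 10 m + 1) 3 m (by norm_num) (by omega) (by omega)]
  have : pvK m = max 3 (Nat.log 10 m + 1 - 3) := by unfold pvK; omega
  rw [this]
  push_cast
  ring

lemma pvLuckyAlt_char (m : Nat) :
    pvLuckyAlt (m : Int) = decide (pvDS (m / 10 ^ pvK m) = pvDS (m % 10 ^ pvK m)) := by
  unfold pvLuckyAlt
  simp only []
  rw [pvFindD_eq m (by omega)]
  have hpos : (0:Int) < ((10 ^ pvK m : Nat) : Int) := by positivity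
  rw [PySem.Int.floordiv_eq_ediv_of_pos hpos, PySem.Int.mod_eq_emod_of_pos hpos]
  have hdiv : (m : Int) / ((10 ^ pvK m : Nat) : Int) = ((m / 10 ^ pvK m : Nat) : Int) := by
    exact Int.ofNat_ediv_ofNat
  have hmod : (m : Int) % ((10 ^ pvK m : Nat) : Int) = ((m % 10 ^ pvK m : Nat) : Int) := by
    push_cast; ring
  rw [hdiv, hmod, pvDigitSum_eq _ (by positivity), pvDigitSum_eq _ (by positivity)]
  rw [Int.toNat_natCast, Int.toNat_natCast]
  rw [show ∀ a b : Int, (a == b) = decide (a = b) from fun _ _ => rfl]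
  rw [decide_eq_decide]
  exact_mod_cast Iff.rfl

lemma pvLucky_eq (i : Int) (h : 0 ≤ i) : lucky_tickets i = pvLuckyAlt i := by
  have : i = ((i.toNat : Nat) : Int) := by omega
  rw [this, pvLuckyA_char, pvLuckyAlt_char]

/- ## Gap structure -/

def pvGapsFrom (a : Int) : List Int → List (Int × Int)
  | [] => []
  | q :: L => (if a < q then [(a, q)] else []) ++ pvGapsFrom (q + 1) L

lemma pvFoldA (b : Int) : ∀ (n : Nat) (a : Int), (b - a).toNat = n →
    ∀ (g : List (Int × Int)) (c : Option Int), (∀ s, c = some s → s < a) →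
    ((PySem.List.pyRange a b 1).foldl pvStepA (g, c)).1
      = g ++ pvGapsFrom (match c with | none => a | some s => s)
          ((PySem.List.pyRange a b 1).filter lucky_tickets) := by
  intro n
  induction n with
  | zero =>
      intro a hn g c _
      rw [PySem.List.pyRange_one_eq_nil (by omega)]
      cases c <;> simp [pvGapsFrom]
  | succ n ih =>
      intro a hn g c hc
      rw [PySem.List.pyRange_one_cons (by omega)]
      rw [List.foldl_cons, List.filter_cons]
      cases c with
      | none =>
          by_cases hl : lucky_tickets a
          · have hstep : pvStepA (g, none) a = (g, none) := by simp [pvStepA, hl]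
            rw [hstep, ih (a + 1) (by omega) g none (by simp)]
            simp [hl, pvGapsFrom]
          · have hstep : pvStepA (g, none) a = (g, some a) := by simp [pvStepA, hl]
            rw [hstep, ih (a + 1) (by omega) g (some a)
              (by intro s hs; injection hs with hs; omega)]
            simp [hl]
      | some t =>
          have hta : t < a := hc t rfl
          by_cases hl : lucky_tickets a
          · have hstep : pvStepA (g, some t) a = (g ++ [(t, a)], none) := by
              simp [pvStepA, hl]
            rw [hstep, ih (a + 1) (by omega) (g ++ [(t, a)]) none (by simp)]
            simp only [hl, if_true, pvGapsFrom]
            rw [if_pos hta]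
            simp
          · have hstep : pvStepA (g, some t) a = (g, some t) := by simp [pvStepA, hl]
            rw [hstep, ih (a + 1) (by omega) g (some t)
              (by intro s hs; injection hs with hs; omega)]
            simp [hl]

lemma pvFoldB (L : List Int) : ∀ (q : Int) (g : List (Int × Int)),
    (((q :: L).zip L).foldl pvStepB g) = g ++ pvGapsFrom (q + 1) L := by
  induction L with
  | nil => intro q g; simp [pvGapsFrom]
  | cons r L ih =>
      intro q g
      rw [List.zip_cons_cons, List.foldl_cons, ih r]
      by_cases hqr : r - q > 1
      · rw [pvGapsFrom, if_pos (by omega)]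
        simp [pvStepB, hqr]
      · rw [pvGapsFrom, if_neg (by omega)]
        simp [pvStepB, hqr]

-- ===== VERDICT (by name: the statement is the Claim_ definition above) =====
lemma pvGaps_eq (s e : Int) (hs : 0 ≤ s) :
    ((PySem.List.pyRange s (e + 1) 1).foldl pvStepA ([], none)).1
      = ((((PySem.List.pyRange s (e + 1) 1).filter pvLuckyAlt).zip
          ((PySem.List.pyRange s (e + 1) 1).filter pvLuckyAlt).tail).foldl pvStepB
          (match ((PySem.List.pyRange s (e + 1) 1).filter pvLuckyAlt) with
           | [] => []
           | q :: _ => if q ≠ s then [(s, q)] else [])) := by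
  have hfilter : (PySem.List.pyRange s (e + 1) 1).filter lucky_tickets
      = (PySem.List.pyRange s (e + 1) 1).filter pvLuckyAlt := by
    apply List.filter_congr
    intro x hx
    exact pvLucky_eq x (by have := PySem.List.mem_pyRange_one.mp hx; omega)
  rw [pvFoldA (e + 1) ((e + 1 - s).toNat) s rfl [] none (by simp), hfilter, List.nil_append]
  dsimp only
  cases hL : (PySem.List.pyRange s (e + 1) 1).filter pvLuckyAlt with
  | nil => simp [pvGapsFrom]
  | cons q L =>
      have hq : s ≤ q := by
        have hmem : q ∈ (PySem.List.pyRange s (e + 1) 1).filter pvLuckyAlt := by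
          rw [hL]; exact List.mem_cons_self
        have := PySem.List.mem_pyRange_one.mp (List.mem_of_mem_filter hmem)
        omega
      rw [List.tail_cons, pvFoldB L q, pvGapsFrom]
      by_cases hqs : q = s
      · rw [if_neg (by omega)]
        simp [hqs]
      · rw [if_pos (by omega)]
        simp [hqs]

theorem find_shortest_longest_gaps_spec : Claim_equal_find_shortest_longest_gaps := by
  intro s e _ hpre
  unfold Spec_find_shortest_longest_gaps
  show find_shortest_longest_gaps s e = find_shortest_longest_gaps_alt s e
  unfold find_shortest_longest_gaps find_shortest_longest_gaps_alt
  dsimp only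
  rcases hpre with hs | hse
  · rw [pvGaps_eq s e hs]
    cases hG : ((((PySem.List.pyRange s (e + 1) 1).filter pvLuckyAlt).zip
        ((PySem.List.pyRange s (e + 1) 1).filter pvLuckyAlt).tail).foldl pvStepB
        (match ((PySem.List.pyRange s (e + 1) 1).filter pvLuckyAlt) with
         | [] => []
         | q :: _ => if q ≠ s then [(s, q)] else [])) with
    | nil => simp
    | cons p G => simp
  · rw [PySem.List.pyRange_one_eq_nil (by omega)]
    simp
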